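-- pv_equiv track=rewrite | github.com/davidichalfyorov-wq/sct-theory | analysis/scripts/fund_combined_dr.py | parity_even_molien
-- ===== SOURCE A (Python) =====
-- def molien_su2_series(n_max: int) -> list[int]:
--     """Compute coefficients of M(t) = (1 + t^6) / ((1-t^2)(1-t^3)(1-t^4)).
--
--     This is the Molien series for SU(2) acting on the 5-dimensional
--     traceless symmetric tensor representation (j=2), which is the
--     representation governing the self-dual part of the Weyl tensor.
--
--     Method: polynomial long division via explicit power series arithmetic.
--     We compute the power series of the denominator (1-t^2)(1-t^3)(1-t^4)
--     and then divide (1+t^6) by it.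
--     """
--     # Build the denominator power series up to degree n_max
--     # Start with 1
--     denom = [0] * (n_max + 1)
--     denom[0] = 1
--
--     # Multiply by 1/(1-t^2) = 1 + t^2 + t^4 + ...
--     temp = [0] * (n_max + 1)
--     for i in range(n_max + 1):
--         for j in range(0, n_max + 1 - i, 2):
--             temp[i + j] += denom[i]
--     denom = temp
--
--     # Multiply by 1/(1-t^3) = 1 + t^3 + t^6 + ...
--     temp = [0] * (n_max + 1)
--     for i in range(n_max + 1):
--         if denom[i] == 0:
--             continue
--         for j in range(0, n_max + 1 - i, 3):
--             temp[i + j] += denom[i]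
--     denom = temp
--
--     # Multiply by 1/(1-t^4) = 1 + t^4 + t^8 + ...
--     temp = [0] * (n_max + 1)
--     for i in range(n_max + 1):
--         if denom[i] == 0:
--             continue
--         for j in range(0, n_max + 1 - i, 4):
--             temp[i + j] += denom[i]
--     denom = temp
--
--     # Now denom[n] = coefficient of t^n in 1/((1-t^2)(1-t^3)(1-t^4))
--     # Multiply by numerator (1 + t^6):
--     # M(t) = denom(t) + t^6 * denom(t)
--     M = [0] * (n_max + 1)
--     for i in range(n_max + 1):
--         M[i] += denom[i]
--         if i >= 6:
--             M[i] += denom[i - 6]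
--
--     return M
--
-- def parity_even_molien(n_max: int) -> list[int]:
--     """Compute full parity-even Weyl invariant count P(t).
--
--     The Weyl tensor C in d=4 decomposes as C = C^+ + C^- under
--     SO(4) ~ (SU(2)_L x SU(2)_R) / Z_2.
--
--     Parity exchanges C^+ <-> C^-, so parity-even invariants at degree n
--     are counted by the Burnside/Polya formula for Z_2 acting on two copies:
--
--         P(t) = (M(t)^2 + M(t^2)) / 2
--
--     where M(t) is the single-SU(2) Molien series.
--
--     Derivation of the formula:
--     - For the Z_2-invariant part of a product ring R^+ tensor R^-, where
--       the Z_2 acts by swapping the two factors: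
--       P(t) = (1/|Z_2|) * [M(t)^2 * chi(identity) + M(t^2) * chi(swap)]
--            = (M(t)^2 + M(t^2)) / 2
--     - chi(identity) = 1 for any representation.
--     - chi(swap) at degree n: the swap permutation on the symmetric algebra
--       S(V tensor V) contributes M(t^2) (this is Polya's trick: when the
--       group element permutes the variables cyclically, substitute t -> t^k
--       for cycle length k).
--
--     This correctly counts invariants of the FULL Weyl tensor that are
--     even under parity (C^+ <-> C^-).
--     """
--     M = molien_su2_series(2 * n_max)  # need M up to 2*n_max for M(t^2) term
--
--     P = [0] * (n_max + 1)
--     for n in range(n_max + 1):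
--         # M(t)^2 at degree n: convolution
--         m_sq = 0
--         for i in range(n + 1):
--             if i < len(M) and (n - i) < len(M):
--                 m_sq += M[i] * M[n - i]
--
--         # M(t^2) at degree n: only contributes if n is even
--         m_t2 = 0
--         if n % 2 == 0 and n // 2 < len(M):
--             m_t2 = M[n // 2]
--
--         P[n] = (m_sq + m_t2) // 2
--
--     return P
-- ===== SOURCE B (Python) =====
-- def parity_even_molien(n_max: int) -> list[int]:
--     """Same P(t) coefficients, computed in O(n_max) via linear recurrences.
--
--     M(t) = (1+t^6)/D(t) with D(t) = (1-t^2)(1-t^3)(1-t^4); the denominator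
--     series is built by three in-place stride prefix-sum passes (one pass per
--     factor), and the coefficients of M(t)^2 = (1+t^6)^2/D(t)^2 satisfy the
--     order-18 linear recurrence given by D(t)^2, avoiding the convolution.
--     """
--     N = 2 * n_max  # M needed up to degree 2*n_max for the M(t^2) term
--     denom = [1] + [0] * N
--     for k in (2, 3, 4):  # multiply by 1/(1-t^k): stride-k prefix sums
--         for m in range(k, N + 1):
--             denom[m] += denom[m - k]
--     M = [denom[i] + (denom[i - 6] if i >= 6 else 0) for i in range(N + 1)]
--
--     # D(t)^2 coefficients (degree 18); sq[n] = coeff of t^n in M(t)^2: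
--     # sum_{k=0}^{18} D2[k]*sq[n-k] = coeff of t^n in (1+t^6)^2 = 1+2t^6+t^12
--     D2 = [1, 0, -2, -2, -1, 4, 5, 2, -3, -8, -3, 2, 5, 4, -1, -2, -2, 0, 1]
--     sq = [0] * (n_max + 1)
--     for n in range(n_max + 1):
--         s = (1 if n == 0 else 0) + (2 if n == 6 else 0) + (1 if n == 12 else 0)
--         for k in range(1, min(n, 18) + 1):
--             s -= D2[k] * sq[n - k]
--         sq[n] = s
--     return [(sq[n] + (M[n // 2] if n % 2 == 0 else 0)) // 2
--             for n in range(n_max + 1)]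
-- ===== Notes on version B (the rewrite author's own statement) =====
-- stated objective: faster
-- what changed: A's quadratic stride double-loops for 1/D(t) become three linear in-place stride prefix-sum passes, and A's per-degree convolution for M(t)^2 becomes an order-18 linear recurrence derived from D(t)^2, so the whole computation is one linear pass.
import Mathlib
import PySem

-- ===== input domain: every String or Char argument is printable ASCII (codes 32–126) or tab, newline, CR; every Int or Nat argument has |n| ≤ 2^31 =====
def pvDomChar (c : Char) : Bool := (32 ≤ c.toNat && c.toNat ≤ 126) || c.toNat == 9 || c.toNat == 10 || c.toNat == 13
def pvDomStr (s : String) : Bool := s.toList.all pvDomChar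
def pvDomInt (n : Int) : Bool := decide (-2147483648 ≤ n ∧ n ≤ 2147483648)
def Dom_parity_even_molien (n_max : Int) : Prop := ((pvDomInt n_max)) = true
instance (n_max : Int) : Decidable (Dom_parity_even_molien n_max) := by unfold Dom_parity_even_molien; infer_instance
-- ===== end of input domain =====

-- B replaces A's quadratic stride double-loops and per-degree convolution by three linear
-- stride prefix-sum passes and an order-18 linear recurrence (objective: faster, O(n_max)).

-- ===== PORT A =====
def molien_su2_series (n_max : Int) : List Int :=
  let denom0 := (List.replicate (n_max + 1).toNat (0 : Int)).set 0 1
  let denom1 := (PySem.List.pyRange 0 (n_max + 1) 1).foldl (fun temp i =>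
      (PySem.List.pyRange 0 (n_max + 1 - i) 2).foldl (fun t j =>
        PySem.List.pySetD t (i + j) (PySem.List.pyGetD t (i + j) 0 + PySem.List.pyGetD denom0 i 0)) temp)
    (List.replicate (n_max + 1).toNat 0)
  let denom2 := (PySem.List.pyRange 0 (n_max + 1) 1).foldl (fun temp i =>
      if PySem.List.pyGetD denom1 i 0 = 0 then temp else
      (PySem.List.pyRange 0 (n_max + 1 - i) 3).foldl (fun t j =>
        PySem.List.pySetD t (i + j) (PySem.List.pyGetD t (i + j) 0 + PySem.List.pyGetD denom1 i 0)) temp)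
    (List.replicate (n_max + 1).toNat 0)
  let denom3 := (PySem.List.pyRange 0 (n_max + 1) 1).foldl (fun temp i =>
      if PySem.List.pyGetD denom2 i 0 = 0 then temp else
      (PySem.List.pyRange 0 (n_max + 1 - i) 4).foldl (fun t j =>
        PySem.List.pySetD t (i + j) (PySem.List.pyGetD t (i + j) 0 + PySem.List.pyGetD denom2 i 0)) temp)
    (List.replicate (n_max + 1).toNat 0)
  (PySem.List.pyRange 0 (n_max + 1) 1).foldl (fun M i =>
      let M1 := PySem.List.pySetD M i (PySem.List.pyGetD M i 0 + PySem.List.pyGetD denom3 i 0)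
      if 6 ≤ i then PySem.List.pySetD M1 i (PySem.List.pyGetD M1 i 0 + PySem.List.pyGetD denom3 (i - 6) 0) else M1)
    (List.replicate (n_max + 1).toNat 0)

def parity_even_molien (n_max : Int) : List Int :=
  let M := molien_su2_series (2 * n_max)
  (PySem.List.pyRange 0 (n_max + 1) 1).foldl (fun P n =>
      let m_sq := (PySem.List.pyRange 0 (n + 1) 1).foldl (fun acc i =>
          if i < (M.length : Int) ∧ n - i < (M.length : Int) then
            acc + PySem.List.pyGetD M i 0 * PySem.List.pyGetD M (n - i) 0
          else acc) 0
      let m_t2 := if PySem.Int.mod n 2 = 0 ∧ PySem.Int.floordiv n 2 < (M.length : Int) then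
          PySem.List.pyGetD M (PySem.Int.floordiv n 2) 0 else 0
      PySem.List.pySetD P n (PySem.Int.floordiv (m_sq + m_t2) 2))
    (List.replicate (n_max + 1).toNat 0)

-- ===== PORT B =====
def parity_even_molien_alt (n_max : Int) : List Int :=
  let N := 2 * n_max
  let denom0 : List Int := 1 :: List.replicate N.toNat 0
  let denom := [(2 : Int), 3, 4].foldl (fun d k =>
      (PySem.List.pyRange k (N + 1) 1).foldl (fun d m =>
        PySem.List.pySetD d m (PySem.List.pyGetD d m 0 + PySem.List.pyGetD d (m - k) 0)) d) denom0
  let M := (PySem.List.pyRange 0 (N + 1) 1).map (fun i =>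
      PySem.List.pyGetD denom i 0 + if 6 ≤ i then PySem.List.pyGetD denom (i - 6) 0 else 0)
  let D2 : List Int := [1, 0, -2, -2, -1, 4, 5, 2, -3, -8, -3, 2, 5, 4, -1, -2, -2, 0, 1]
  let sq := (PySem.List.pyRange 0 (n_max + 1) 1).foldl (fun sq n =>
      let s0 : Int := (if n = 0 then 1 else 0) + (if n = 6 then 2 else 0) + (if n = 12 then 1 else 0)
      let s := (PySem.List.pyRange 1 (min n 18 + 1) 1).foldl (fun s k =>
          s - PySem.List.pyGetD D2 k 0 * PySem.List.pyGetD sq (n - k) 0) s0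
      PySem.List.pySetD sq n s)
    (List.replicate (n_max + 1).toNat 0)
  (PySem.List.pyRange 0 (n_max + 1) 1).map (fun n =>
      PySem.Int.floordiv (PySem.List.pyGetD sq n 0 +
        if PySem.Int.mod n 2 = 0 then PySem.List.pyGetD M (PySem.Int.floordiv n 2) 0 else 0) 2)

-- ===== PRECONDITION & SPEC =====
-- Pre_ excludes exactly the inputs n_max < 0, on which A raises IndexError (denom[0] = 1 on an empty list).
def Pre_parity_even_molien (n_max : Int) : Prop := 0 ≤ n_max
instance (n_max : Int) : Decidable (Pre_parity_even_molien n_max) := by unfold Pre_parity_even_molien; infer_instance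
def pvWitness_parity_even_molien : Int := 3

def Spec_parity_even_molien (n_max : Int) (out : List Int) : Prop := out = parity_even_molien_alt n_max
instance (n_max : Int) (out : List Int) : Decidable (Spec_parity_even_molien n_max out) := by unfold Spec_parity_even_molien; infer_instance

-- ===== CLAIM (what is proved, stated in full; the proofs are below) =====
def Claim_equal_parity_even_molien : Prop := ∀ (n_max : Int), Dom_parity_even_molien n_max → Pre_parity_even_molien n_max → Spec_parity_even_molien n_max (parity_even_molien n_max)

-- ===== LEMMAS AND PROOFS =====

lemma pv_getD_map_range (f : ℕ → ℤ) (L m : ℕ) :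
    ((List.range L).map f).getD m 0 = if m < L then f m else 0 := by
  rcases lt_or_ge m L with h | h
  · simp [h]
  · rw [List.getD_eq_default]
    · simp [Nat.not_lt.mpr h]
    · simpa using h

lemma pv_set_map_range (f : ℕ → ℤ) {L m : ℕ} (h : m < L) (v : ℤ) :
    ((List.range L).map f).set m v = (List.range L).map (Function.update f m v) := by
  apply List.ext_getElem (by simp)
  intro i h1 h2
  simp only [List.getElem_set, List.getElem_map, Function.update_apply, List.getElem_range]
  split_ifs with a b b <;> first | rfl | omega

lemma pv_addAt (s : ℕ) (hs : 0 < s) (L i : ℕ) (v : ℤ) (f : ℕ → ℤ) (c : ℕ)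
    (hc : ∀ t < c, i + s * t < L) :
    (List.range c).foldl
      (fun t (k : ℕ) => PySem.List.pySetD t ((i : ℤ) + ((0 : ℤ) + (s : ℤ) * (k : ℤ)))
        (PySem.List.pyGetD t ((i : ℤ) + ((0 : ℤ) + (s : ℤ) * (k : ℤ))) 0 + v))
      ((List.range L).map f)
    = (List.range L).map (fun m => f m + if i ≤ m ∧ s ∣ (m - i) ∧ m < i + s * c then v else 0) := by
  induction c with
  | zero =>
    simp only [List.range_zero, List.foldl_nil]
    apply List.map_congr_left
    intro m _
    rw [if_neg (fun h => absurd h.2.2 (by omega))]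
    ring
  | succ c ih =>
    rw [List.range_succ, List.foldl_append, ih (fun t ht => hc t (by omega))]
    simp only [List.foldl_cons, List.foldl_nil]
    have hp : i + s * c < L := hc c (by omega)
    have hsucc : s * (c + 1) = s * c + s := Nat.mul_succ s c
    have hidx : (i : ℤ) + ((0 : ℤ) + (s : ℤ) * (c : ℤ)) = ((i + s * c : ℕ) : ℤ) := by push_cast; ring
    rw [hidx, PySem.List.pyGetD_natCast, PySem.List.pySetD_natCast, pv_getD_map_range,
      if_pos hp, pv_set_map_range _ hp]
    apply List.map_congr_left
    intro m hm
    rcases eq_or_ne m (i + s * c) with rfl | hne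
    · rw [Function.update_self]
      rw [if_neg (fun h => absurd h.2.2 (by omega)), if_pos ⟨by omega, ⟨c, by omega⟩, by omega⟩]
      ring
    · rw [Function.update_of_ne hne]
      by_cases h1 : i ≤ m ∧ s ∣ (m - i)
      · obtain ⟨h1a, t, h1b⟩ := h1
        have hmt : m = i + s * t := by omega
        subst hmt
        have htc : t ≠ c := fun h => hne (by rw [h])
        by_cases h2 : t < c
        · have hlt : s * (t + 1) ≤ s * c := Nat.mul_le_mul_left s h2
          have hts : s * (t + 1) = s * t + s := Nat.mul_succ s t
          rw [if_pos ⟨by omega, ⟨t, by omega⟩, by omega⟩, if_pos ⟨by omega, ⟨t, by omega⟩, by omega⟩]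
        · have hge : c + 1 ≤ t := by omega
          have hmul : s * (c + 1) ≤ s * t := Nat.mul_le_mul_left s hge
          rw [if_neg (fun h => absurd h.2.2 (by omega)), if_neg (fun h => absurd h.2.2 (by omega))]
      · rw [if_neg (fun h => h1 ⟨h.1, h.2.1⟩), if_neg (fun h => h1 ⟨h.1, h.2.1⟩)]

lemma pv_innerA (s : ℕ) (hs : 0 < s) (L i : ℕ) (hi : i < L) (v : ℤ) (f : ℕ → ℤ) :
    (PySem.List.pyRange 0 ((L : ℤ) - (i : ℤ)) (s : ℤ)).foldl
      (fun t j => PySem.List.pySetD t ((i : ℤ) + j) (PySem.List.pyGetD t ((i : ℤ) + j) 0 + v))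
      ((List.range L).map f)
    = (List.range L).map (fun m => f m + if i ≤ m ∧ s ∣ (m - i) then v else 0) := by
  have hsz : (0 : ℤ) < (s : ℤ) := by exact_mod_cast hs
  rw [PySem.List.pyRange_of_pos 0 ((L : ℤ) - (i : ℤ)) hsz]
  have he : (0 : ℤ) < (L : ℤ) - (i : ℤ) := by
    have : (i : ℤ) < (L : ℤ) := by exact_mod_cast hi
    omega
  rw [if_pos he]
  have hnum : ((L : ℤ) - (i : ℤ) - 0 + (s : ℤ) - 1) = ((L - i + s - 1 : ℕ) : ℤ) := by
    omega
  have hdiv : ((((L - i + s - 1 : ℕ) : ℤ)) / (s : ℤ)).toNat = (L - i + s - 1) / s := by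
    rfl
  set cN := (L - i + s - 1) / s with hcN
  have hcNeq : cN = (L - 1 - i) / s + 1 := by
    rw [hcN, show L - i + s - 1 = (L - 1 - i) + s from by omega, Nat.add_div_right _ hs]
  have hbound : ∀ t < cN, i + s * t < L := by
    intro t ht
    have h1 : t ≤ (L - 1 - i) / s := by omega
    have h2 : s * t ≤ s * ((L - 1 - i) / s) := Nat.mul_le_mul_left s h1
    have h3 : s * ((L - 1 - i) / s) ≤ L - 1 - i := Nat.mul_div_le _ s
    omega
  rw [hnum, hdiv, List.foldl_map, pv_addAt s hs L i v f cN hbound]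
  apply List.map_congr_left
  intro m hm
  have hmL : m < L := List.mem_range.mp hm
  congr 1
  by_cases h1 : i ≤ m ∧ s ∣ (m - i)
  · obtain ⟨h1a, q, h1b⟩ := h1
    have hq : q ≤ (L - 1 - i) / s := by
      have : q = (m - i) / s := by rw [h1b, Nat.mul_div_cancel_left _ hs]
      rw [this]
      exact Nat.div_le_div_right (by omega)
    have h2 : s * q ≤ s * ((L - 1 - i) / s) := Nat.mul_le_mul_left s hq
    have h3 : s * ((L - 1 - i) / s) ≤ L - 1 - i := Nat.mul_div_le _ s
    have hlt : m < i + s * cN := by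
      have : s * cN = s * ((L - 1 - i) / s) + s := by rw [hcNeq, Nat.mul_succ]
      omega
    rw [if_pos ⟨h1a, ⟨q, h1b⟩, hlt⟩, if_pos ⟨h1a, ⟨q, h1b⟩⟩]
  · rw [if_neg (fun h => h1 ⟨h.1, h.2.1⟩), if_neg (fun h => h1 ⟨h.1, h.2⟩)]

lemma pv_passA (s : ℕ) (hs : 0 < s) (L : ℕ) (g : ℕ → ℤ) (P : ℤ → Prop) [DecidablePred P]
    (hP : ∀ c : ℕ, c < L → P (c : ℤ) → g c = 0) :
    (PySem.List.pyRange 0 (L : ℤ) 1).foldl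
      (fun temp i => if P i then temp else
        (PySem.List.pyRange 0 ((L : ℤ) - i) (s : ℤ)).foldl
          (fun t j => PySem.List.pySetD t (i + j) (PySem.List.pyGetD t (i + j) 0 + PySem.List.pyGetD ((List.range L).map g) i 0)) temp)
      ((List.range L).map fun _ => 0)
    = (List.range L).map (fun m => ∑ i ∈ Finset.range (m + 1), if s ∣ (m - i) then g i else 0) := by
  have key : ∀ c : ℕ, c ≤ L →
      (PySem.List.pyRange 0 (c : ℤ) 1).foldl
        (fun temp i => if P i then temp else
          (PySem.List.pyRange 0 ((L : ℤ) - i) (s : ℤ)).foldl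
            (fun t j => PySem.List.pySetD t (i + j) (PySem.List.pyGetD t (i + j) 0 + PySem.List.pyGetD ((List.range L).map g) i 0)) temp)
        ((List.range L).map fun _ => 0)
      = (List.range L).map (fun m => ∑ i ∈ Finset.range c, if i ≤ m ∧ s ∣ (m - i) then g i else 0) := by
    intro c
    induction c with
    | zero =>
      intro _
      rw [show ((0 : ℕ) : ℤ) = 0 from rfl, PySem.List.pyRange_zero]
      simp
    | succ c ih =>
      intro hle
      rw [show ((c + 1 : ℕ) : ℤ) = (c : ℤ) + 1 from by push_cast; ring,
        PySem.List.pyRange_one_succ_right (by exact_mod_cast Nat.zero_le c), List.foldl_append,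
        ih (by omega)]
      simp only [List.foldl_cons, List.foldl_nil]
      have hgc : PySem.List.pyGetD ((List.range L).map g) (c : ℤ) 0 = g c := by
        rw [PySem.List.pyGetD_natCast, pv_getD_map_range, if_pos (by omega)]
      by_cases hPc : P (c : ℤ)
      · rw [if_pos hPc]
        apply List.map_congr_left
        intro m hm
        have hz : (if c ≤ m ∧ s ∣ (m - c) then g c else 0) = 0 := by
          rw [hP c (by omega) hPc]; simp
        rw [Finset.sum_range_succ, hz, add_zero]
      · rw [if_neg hPc, hgc, pv_innerA s hs L c (by omega)]
        apply List.map_congr_left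
        intro m hm
        rw [Finset.sum_range_succ]
  rw [key L (le_refl L)]
  apply List.map_congr_left
  intro m hm
  have hmL : m < L := List.mem_range.mp hm
  have hsub : Finset.range (m + 1) ⊆ Finset.range L := by
    intro x hx; simp only [Finset.mem_range] at hx ⊢; omega
  rw [← Finset.sum_subset hsub
    (fun i _ hni => if_neg (fun h => hni (Finset.mem_range.mpr (by omega))))]
  apply Finset.sum_congr rfl
  intro i hi
  have him : i ≤ m := by simp only [Finset.mem_range] at hi; omega
  rw [if_congr (and_iff_right him) rfl rfl]

def pvPref (k : ℕ) (f : ℕ → ℤ) : ℕ → ℤ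
  | m => f m + if k + 1 ≤ m then pvPref k f (m - (k + 1)) else 0
  termination_by m => m
  decreasing_by omega

lemma pv_stride_sum_pref (k : ℕ) (g : ℕ → ℤ) (m : ℕ) :
    (∑ i ∈ Finset.range (m + 1), if (k + 1) ∣ (m - i) then g i else 0) = pvPref k g m := by
  induction m using Nat.strong_induction_on with
  | _ m ih =>
    rw [pvPref]
    by_cases hm : k + 1 ≤ m
    · have hsplit : Finset.range (m + 1) = Finset.range (m - (k + 1) + 1) ∪ Finset.Ico (m - (k + 1) + 1) (m + 1) := by
        rw [Finset.range_eq_Ico]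
        exact (Finset.Ico_union_Ico_eq_Ico (by omega) (by omega)).symm
      rw [hsplit, Finset.sum_union (by
        rw [Finset.range_eq_Ico]
        exact Finset.Ico_disjoint_Ico_consecutive 0 _ _)]
      have h1 : (∑ i ∈ Finset.range (m - (k + 1) + 1), if (k + 1) ∣ (m - i) then g i else 0)
          = ∑ i ∈ Finset.range (m - (k + 1) + 1), if (k + 1) ∣ (m - (k + 1) - i) then g i else 0 := by
        apply Finset.sum_congr rfl
        intro i hi
        have hile : i ≤ m - (k + 1) := by simp only [Finset.mem_range] at hi; omega
        have : m - i = (m - (k + 1) - i) + (k + 1) := by omega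
        rw [this]
        exact if_congr Nat.dvd_add_self_right rfl rfl
      have h2 : (∑ i ∈ Finset.Ico (m - (k + 1) + 1) (m + 1), if (k + 1) ∣ (m - i) then g i else 0) = g m := by
        rw [Finset.sum_eq_single_of_mem m (Finset.mem_Ico.mpr (by omega))]
        · rw [if_pos (by simp)]
        · intro i hi hne
          have : m - i < k + 1 ∧ 0 < m - i := by simp only [Finset.mem_Ico] at hi; omega
          rw [if_neg (fun ⟨q, hq⟩ => by rcases q with _ | q <;> simp [Nat.mul_succ] at hq <;> omega)]
      rw [h1, h2, ih (m - (k + 1)) (by omega), if_pos hm, add_comm]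
    · rw [if_neg hm, add_zero]
      rw [Finset.sum_eq_single_of_mem m (Finset.mem_range.mpr (by omega))]
      · rw [if_pos (by simp)]
      · intro i hi hne
        have : m - i < k + 1 ∧ 0 < m - i := by simp only [Finset.mem_range] at hi; omega
        rw [if_neg (fun ⟨q, hq⟩ => by rcases q with _ | q <;> simp [Nat.mul_succ] at hq <;> omega)]

lemma pv_fill_loop (L a : ℕ) (haL : a ≤ L) (f g : ℕ → ℤ) (body : List ℤ → ℤ → List ℤ)
    (hbody : ∀ c : ℕ, a ≤ c → c < L →
      body ((List.range L).map fun m => if m < c then g m else f m) (c : ℤ)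
        = (List.range L).map (fun m => if m < c + 1 then g m else f m))
    (hfg : ∀ m < a, f m = g m) :
    (PySem.List.pyRange (a : ℤ) (L : ℤ) 1).foldl body ((List.range L).map f)
      = (List.range L).map g := by
  have key : ∀ t : ℕ, a + t ≤ L →
      (PySem.List.pyRange (a : ℤ) ((a + t : ℕ) : ℤ) 1).foldl body ((List.range L).map f)
        = (List.range L).map (fun m => if m < a + t then g m else f m) := by
    intro t
    induction t with
    | zero =>
      intro _
      rw [PySem.List.pyRange_one_eq_nil (by omega)]
      simp only [List.foldl_nil]
      apply List.map_congr_left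
      intro m hm
      rcases lt_or_ge m a with hlt | hge
      · simp [hlt, hfg m hlt]
      · simp [Nat.not_lt.mpr hge]
    | succ t ih =>
      intro hle
      have h1 : ((a + (t+1) : ℕ) : ℤ) = ((a + t : ℕ) : ℤ) + 1 := by push_cast; ring
      rw [h1, PySem.List.pyRange_one_succ_right (by exact_mod_cast by omega), List.foldl_append,
        ih (by omega)]
      simp only [List.foldl_cons, List.foldl_nil]
      rw [hbody (a + t) (by omega) (by omega), Nat.add_assoc]
  have := key (L - a) (by omega)
  rw [show a + (L - a) = L from by omega] at this
  rw [this]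
  apply List.map_congr_left
  intro m hm
  simp [List.mem_range.mp hm]

lemma pv_map_range_congr {f g : ℕ → ℤ} (L : ℕ) (h : ∀ m < L, f m = g m) :
    (List.range L).map f = (List.range L).map g := by
  apply List.map_congr_left
  intro m hm
  exact h m (List.mem_range.mp hm)

def pvDelta : ℕ → ℤ := fun m => if m = 0 then 1 else 0
def pvDd : ℕ → ℤ := pvPref 3 (pvPref 2 (pvPref 1 pvDelta))
def pvM : ℕ → ℤ := fun m => pvDd m + if 6 ≤ m then pvDd (m - 6) else 0

lemma pv_pass_noskip (s : ℕ) (hs : 0 < s) (L : ℕ) (g : ℕ → ℤ) :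
    (PySem.List.pyRange 0 (L : ℤ) 1).foldl
      (fun temp i =>
        (PySem.List.pyRange 0 ((L : ℤ) - i) (s : ℤ)).foldl
          (fun t j => PySem.List.pySetD t (i + j) (PySem.List.pyGetD t (i + j) 0 + PySem.List.pyGetD ((List.range L).map g) i 0)) temp)
      ((List.range L).map fun _ => 0)
    = (List.range L).map (fun m => ∑ i ∈ Finset.range (m + 1), if s ∣ (m - i) then g i else 0) := by
  rw [List.foldl_ext _ (fun temp i => if (fun (_ : ℤ) => False) i then temp else
        (PySem.List.pyRange 0 ((L : ℤ) - i) (s : ℤ)).foldl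
          (fun t j => PySem.List.pySetD t (i + j) (PySem.List.pyGetD t (i + j) 0 + PySem.List.pyGetD ((List.range L).map g) i 0)) temp)
      _ (fun a b _ => by simp)]
  exact pv_passA s hs L g (fun _ => False) (fun c _ h => h.elim)

lemma pv_pass_skip (s : ℕ) (hs : 0 < s) (L : ℕ) (g : ℕ → ℤ) :
    (PySem.List.pyRange 0 (L : ℤ) 1).foldl
      (fun temp i => if PySem.List.pyGetD ((List.range L).map g) i 0 = 0 then temp else
        (PySem.List.pyRange 0 ((L : ℤ) - i) (s : ℤ)).foldl
          (fun t j => PySem.List.pySetD t (i + j) (PySem.List.pyGetD t (i + j) 0 + PySem.List.pyGetD ((List.range L).map g) i 0)) temp)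
      ((List.range L).map fun _ => 0)
    = (List.range L).map (fun m => ∑ i ∈ Finset.range (m + 1), if s ∣ (m - i) then g i else 0) :=
  pv_passA s hs L g (fun i => PySem.List.pyGetD ((List.range L).map g) i 0 = 0)
    (fun c hc h => by
      have h' : PySem.List.pyGetD ((List.range L).map g) ((c : ℕ) : ℤ) 0 = 0 := h
      rwa [PySem.List.pyGetD_natCast, pv_getD_map_range, if_pos hc] at h')

lemma pv_molien_char (n : ℕ) :
    molien_su2_series (n : Int) = (List.range (n + 1)).map pvM := by
  have hL : ((n : ℤ) + 1) = ((n + 1 : ℕ) : ℤ) := by push_cast; ring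
  have hrep : List.replicate ((n : ℤ) + 1).toNat (0 : ℤ) = (List.range (n + 1)).map (fun _ => 0) := by
    rw [List.map_const', List.length_range, hL, Int.toNat_natCast]
  have h0 : (List.replicate ((n : ℤ) + 1).toNat (0 : ℤ)).set 0 1 = (List.range (n + 1)).map pvDelta := by
    rw [hrep, pv_set_map_range _ (by omega)]
    apply pv_map_range_congr
    intro m _
    simp [Function.update_apply, pvDelta]
  simp only [molien_su2_series]
  rw [h0, hrep, hL]
  have h1 := pv_pass_noskip 2 (by omega) (n + 1) pvDelta
  rw [show ((2:ℕ):ℤ) = (2:ℤ) from rfl] at h1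
  rw [h1]
  have e1 : (List.range (n + 1)).map (fun m => ∑ i ∈ Finset.range (m + 1), if 2 ∣ (m - i) then pvDelta i else 0)
      = (List.range (n + 1)).map (pvPref 1 pvDelta) :=
    pv_map_range_congr _ (fun m _ => pv_stride_sum_pref 1 pvDelta m)
  rw [e1]
  have h2 := pv_pass_skip 3 (by omega) (n + 1) (pvPref 1 pvDelta)
  rw [show ((3:ℕ):ℤ) = (3:ℤ) from rfl] at h2
  rw [h2]
  have e2 : (List.range (n + 1)).map (fun m => ∑ i ∈ Finset.range (m + 1), if 3 ∣ (m - i) then pvPref 1 pvDelta i else 0)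
      = (List.range (n + 1)).map (pvPref 2 (pvPref 1 pvDelta)) :=
    pv_map_range_congr _ (fun m _ => pv_stride_sum_pref 2 (pvPref 1 pvDelta) m)
  rw [e2]
  have h3 := pv_pass_skip 4 (by omega) (n + 1) (pvPref 2 (pvPref 1 pvDelta))
  rw [show ((4:ℕ):ℤ) = (4:ℤ) from rfl] at h3
  rw [h3]
  have e3 : (List.range (n + 1)).map (fun m => ∑ i ∈ Finset.range (m + 1), if 4 ∣ (m - i) then pvPref 2 (pvPref 1 pvDelta) i else 0)
      = (List.range (n + 1)).map pvDd :=
    pv_map_range_congr _ (fun m _ => pv_stride_sum_pref 3 (pvPref 2 (pvPref 1 pvDelta)) m)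
  rw [e3]
  have hfill := pv_fill_loop (n + 1) 0 (by omega) (fun _ => 0) pvM
    (fun M i =>
      if 6 ≤ i then
        PySem.List.pySetD
          (PySem.List.pySetD M i
            (PySem.List.pyGetD M i 0 + PySem.List.pyGetD ((List.range (n + 1)).map pvDd) i 0)) i
          (PySem.List.pyGetD
              (PySem.List.pySetD M i
                (PySem.List.pyGetD M i 0 + PySem.List.pyGetD ((List.range (n + 1)).map pvDd) i 0)) i 0 +
            PySem.List.pyGetD ((List.range (n + 1)).map pvDd) (i - 6) 0)
      else PySem.List.pySetD M i
        (PySem.List.pyGetD M i 0 + PySem.List.pyGetD ((List.range (n + 1)).map pvDd) i 0))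
    (fun c _ hc => by
      dsimp only
      have hgetc : PySem.List.pyGetD ((List.range (n + 1)).map (fun m => if m < c then pvM m else 0)) (c : ℤ) 0 = 0 := by
        rw [PySem.List.pyGetD_natCast, pv_getD_map_range, if_pos hc]; simp
      have hgetdd : PySem.List.pyGetD ((List.range (n + 1)).map pvDd) (c : ℤ) 0 = pvDd c := by
        rw [PySem.List.pyGetD_natCast, pv_getD_map_range, if_pos hc]
      have hset1 : PySem.List.pySetD ((List.range (n + 1)).map (fun m => if m < c then pvM m else 0)) (c : ℤ) (0 + pvDd c)
          = (List.range (n + 1)).map (Function.update (fun m => if m < c then pvM m else 0) c (0 + pvDd c)) := by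
        rw [PySem.List.pySetD_natCast, pv_set_map_range _ hc]
      rcases le_or_gt 6 c with h6 | h6
      · rw [if_pos (show (6 : ℤ) ≤ (c : ℤ) by exact_mod_cast h6), hgetc, hgetdd, hset1]
        have hget2 : PySem.List.pyGetD ((List.range (n + 1)).map (Function.update (fun m => if m < c then pvM m else 0) c (0 + pvDd c))) (c : ℤ) 0 = 0 + pvDd c := by
          rw [PySem.List.pyGetD_natCast, pv_getD_map_range, if_pos hc, Function.update_self]
        have hgetdd6 : PySem.List.pyGetD ((List.range (n + 1)).map pvDd) ((c : ℤ) - 6) 0 = pvDd (c - 6) := by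
          rw [show ((c : ℤ) - 6) = ((c - 6 : ℕ) : ℤ) from by omega,
            PySem.List.pyGetD_natCast, pv_getD_map_range, if_pos (by omega : c - 6 < n + 1)]
        rw [hget2, hgetdd6, PySem.List.pySetD_natCast, pv_set_map_range _ hc, Function.update_idem]
        apply pv_map_range_congr
        intro m hm
        rcases eq_or_ne m c with rfl | hne
        · rw [Function.update_self, if_pos (by omega)]
          simp [pvM, h6]
        · rw [Function.update_of_ne hne]
          rcases lt_or_ge m c with h | h
          · rw [if_pos h, if_pos (by omega)]
          · rw [if_neg (by omega), if_neg (by omega)]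
      · rw [if_neg (show ¬ (6 : ℤ) ≤ (c : ℤ) by exact_mod_cast not_le.mpr h6), hgetc, hgetdd, hset1]
        apply pv_map_range_congr
        intro m hm
        rcases eq_or_ne m c with rfl | hne
        · rw [Function.update_self, if_pos (by omega)]
          simp [pvM, Nat.not_le.mpr h6]
        · rw [Function.update_of_ne hne]
          rcases lt_or_ge m c with h | h
          · rw [if_pos h, if_pos (by omega)]
          · rw [if_neg (by omega), if_neg (by omega)])
    (fun m hm => absurd hm (by omega))
  rw [show ((0 : ℕ) : ℤ) = (0 : ℤ) from rfl] at hfill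
  rw [hfill]
def pvNum2 : ℕ → ℤ := fun n => (if n = 0 then 1 else 0) + (if n = 6 then 2 else 0) + (if n = 12 then 1 else 0)
def pvD2 : ℕ → ℤ := fun k => ([1, 0, -2, -2, -1, 4, 5, 2, -3, -8, -3, 2, 5, 4, -1, -2, -2, 0, 1] : List ℤ).getD k 0
def pvSqList : ℕ → List ℤ
  | 0 => []
  | n + 1 => pvSqList n ++
      [pvNum2 n - ((List.range (min n 18)).map (fun t => pvD2 (t + 1) * (pvSqList n).getD (n - (t + 1)) 0)).sum]
def pvSq (n : ℕ) : ℤ := (pvSqList (n + 1)).getD n 0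
def pvConvMM : ℕ → ℤ := fun n => ∑ i ∈ Finset.range (n + 1), pvM i * pvM (n - i)

lemma pv_sum_list_finset (f : ℕ → ℤ) (n : ℕ) :
    ((List.range n).map f).sum = ∑ i ∈ Finset.range n, f i := rfl

lemma pv_sqList_length (n : ℕ) : (pvSqList n).length = n := by
  induction n with
  | zero => rfl
  | succ n ih => rw [pvSqList]; simp [ih]

lemma pv_sqList_getD {m n : ℕ} (h : m < n) : (pvSqList n).getD m 0 = pvSq m := by
  induction n with
  | zero => omega
  | succ n ih =>
    rcases Nat.lt_or_ge m n with h' | h'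
    · rw [pvSqList, List.getD_append _ _ _ _ (by rw [pv_sqList_length]; omega), ih h']
    · have hm : m = n := by omega
      subst hm
      rfl

lemma pv_sq_rec (n : ℕ) :
    pvSq n = pvNum2 n - ((List.range (min n 18)).map (fun t => pvD2 (t + 1) * pvSq (n - (t + 1)))).sum := by
  show (pvSqList (n + 1)).getD n 0 = _
  rw [pvSqList, List.getD_append_right _ _ _ _ (by rw [pv_sqList_length])]
  rw [pv_sqList_length]
  simp only [Nat.sub_self, List.getD_cons_zero]
  congr 1
  apply congrArg List.sum
  apply List.map_congr_left
  intro t ht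
  have htn : t < min n 18 := List.mem_range.mp ht
  rw [pv_sqList_getD (by omega)]

lemma pv_coeff_mk_mul (f g : ℕ → ℤ) (n : ℕ) :
    (PowerSeries.coeff n) (PowerSeries.mk f * PowerSeries.mk g)
      = ∑ i ∈ Finset.range (n + 1), f i * g (n - i) := by
  rw [PowerSeries.coeff_mul, Finset.Nat.sum_antidiagonal_eq_sum_range_succ_mk]
  simp [PowerSeries.coeff_mk]

lemma pv_mk_pref_mul (k : ℕ) (f : ℕ → ℤ) :
    PowerSeries.mk (pvPref k f) * (1 - PowerSeries.X ^ (k + 1)) = PowerSeries.mk f := by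
  ext n
  rw [mul_sub, mul_one, map_sub, PowerSeries.coeff_mul_X_pow']
  simp only [PowerSeries.coeff_mk]
  rw [pvPref]
  split_ifs <;> ring

lemma pv_mk_delta : PowerSeries.mk pvDelta = 1 := by
  ext n
  simp [pvDelta, PowerSeries.coeff_one]

lemma pv_mk_M : PowerSeries.mk pvM = PowerSeries.mk pvDd * (1 + PowerSeries.X ^ 6) := by
  ext n
  rw [mul_add, mul_one, map_add, PowerSeries.coeff_mul_X_pow']
  simp only [PowerSeries.coeff_mk, pvM]

lemma pv_dd_D : PowerSeries.mk pvDd *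
    ((1 - PowerSeries.X ^ 2) * (1 - PowerSeries.X ^ 3) * (1 - PowerSeries.X ^ 4)) = 1 := by
  have h2 := pv_mk_pref_mul 1 pvDelta
  have h3 := pv_mk_pref_mul 2 (pvPref 1 pvDelta)
  have h4 := pv_mk_pref_mul 3 (pvPref 2 (pvPref 1 pvDelta))
  norm_num at h2 h3 h4
  calc PowerSeries.mk pvDd * ((1 - PowerSeries.X ^ 2) * (1 - PowerSeries.X ^ 3) * (1 - PowerSeries.X ^ 4))
      = ((PowerSeries.mk pvDd * (1 - PowerSeries.X ^ 4)) * (1 - PowerSeries.X ^ 3)) * (1 - PowerSeries.X ^ 2) := by ring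
    _ = 1 := by rw [show PowerSeries.mk pvDd = PowerSeries.mk (pvPref 3 (pvPref 2 (pvPref 1 pvDelta))) from rfl, h4, h3, h2, pv_mk_delta]

lemma pv_M_D : PowerSeries.mk pvM *
    ((1 - PowerSeries.X ^ 2) * (1 - PowerSeries.X ^ 3) * (1 - PowerSeries.X ^ 4))
    = 1 + PowerSeries.X ^ 6 := by
  rw [pv_mk_M]
  calc PowerSeries.mk pvDd * (1 + PowerSeries.X ^ 6) * ((1 - PowerSeries.X ^ 2) * (1 - PowerSeries.X ^ 3) * (1 - PowerSeries.X ^ 4))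
      = (1 + PowerSeries.X ^ 6) * (PowerSeries.mk pvDd * ((1 - PowerSeries.X ^ 2) * (1 - PowerSeries.X ^ 3) * (1 - PowerSeries.X ^ 4))) := by ring
    _ = 1 + PowerSeries.X ^ 6 := by rw [pv_dd_D, mul_one]

lemma pv_mk_D2 : PowerSeries.mk pvD2
    = ((1 - PowerSeries.X ^ 2) * (1 - PowerSeries.X ^ 3) * (1 - PowerSeries.X ^ 4)) ^ 2 := by
  have hD : (((1 - PowerSeries.X ^ 2) * (1 - PowerSeries.X ^ 3) * (1 - PowerSeries.X ^ 4)) ^ 2 : PowerSeries ℤ)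
      = 1 - 2 * PowerSeries.X ^ 2 - 2 * PowerSeries.X ^ 3 - PowerSeries.X ^ 4 + 4 * PowerSeries.X ^ 5
        + 5 * PowerSeries.X ^ 6 + 2 * PowerSeries.X ^ 7 - 3 * PowerSeries.X ^ 8 - 8 * PowerSeries.X ^ 9
        - 3 * PowerSeries.X ^ 10 + 2 * PowerSeries.X ^ 11 + 5 * PowerSeries.X ^ 12 + 4 * PowerSeries.X ^ 13
        - PowerSeries.X ^ 14 - 2 * PowerSeries.X ^ 15 - 2 * PowerSeries.X ^ 16 + PowerSeries.X ^ 18 := by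
    ring
  rw [hD, show (2 : PowerSeries ℤ) = PowerSeries.C 2 from by norm_num,
    show (4 : PowerSeries ℤ) = PowerSeries.C 4 from by norm_num,
    show (5 : PowerSeries ℤ) = PowerSeries.C 5 from by norm_num,
    show (3 : PowerSeries ℤ) = PowerSeries.C 3 from by norm_num,
    show (8 : PowerSeries ℤ) = PowerSeries.C 8 from by norm_num]
  ext n
  simp only [map_sub, map_add, PowerSeries.coeff_one, PowerSeries.coeff_C_mul,
    PowerSeries.coeff_X_pow, PowerSeries.coeff_mk]
  rcases Nat.lt_or_ge n 19 with h | h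
  · interval_cases n <;> norm_num [pvD2]
  · rw [show pvD2 n = 0 from List.getD_eq_default _ _ (by simp; omega)]
    simp [show n ≠ 0 from by omega, show n ≠ 2 from by omega, show n ≠ 3 from by omega, show n ≠ 4 from by omega, show n ≠ 5 from by omega, show n ≠ 6 from by omega, show n ≠ 7 from by omega, show n ≠ 8 from by omega, show n ≠ 9 from by omega, show n ≠ 10 from by omega, show n ≠ 11 from by omega, show n ≠ 12 from by omega, show n ≠ 13 from by omega, show n ≠ 14 from by omega, show n ≠ 15 from by omega, show n ≠ 16 from by omega, show n ≠ 18 from by omega]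

lemma pv_mk_conv : PowerSeries.mk pvConvMM = PowerSeries.mk pvM * PowerSeries.mk pvM := by
  ext n
  rw [pv_coeff_mk_mul, PowerSeries.coeff_mk]
  rfl

lemma pv_rec_conv (n : ℕ) :
    ∑ i ∈ Finset.range (n + 1), pvD2 i * pvConvMM (n - i) = pvNum2 n := by
  have key : PowerSeries.mk pvD2 * PowerSeries.mk pvConvMM
      = (1 + PowerSeries.X ^ 6) * (1 + PowerSeries.X ^ 6) := by
    rw [pv_mk_conv, pv_mk_D2]
    calc ((1 - PowerSeries.X ^ 2) * (1 - PowerSeries.X ^ 3) * (1 - PowerSeries.X ^ 4)) ^ 2 * (PowerSeries.mk pvM * PowerSeries.mk pvM)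
        = (PowerSeries.mk pvM * ((1 - PowerSeries.X ^ 2) * (1 - PowerSeries.X ^ 3) * (1 - PowerSeries.X ^ 4)))
          * (PowerSeries.mk pvM * ((1 - PowerSeries.X ^ 2) * (1 - PowerSeries.X ^ 3) * (1 - PowerSeries.X ^ 4))) := by ring
      _ = _ := by rw [pv_M_D]
  have h1 := congrArg (PowerSeries.coeff n) key
  rw [pv_coeff_mk_mul] at h1
  rw [h1]
  have hexp : ((1 + PowerSeries.X ^ 6) * (1 + PowerSeries.X ^ 6) : PowerSeries ℤ)
      = 1 + PowerSeries.X ^ 6 + PowerSeries.X ^ 6 + PowerSeries.X ^ 12 := by ring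
  rw [hexp]
  simp only [map_add, PowerSeries.coeff_one, PowerSeries.coeff_X_pow, pvNum2]
  split_ifs <;> omega

lemma pv_conv_eq_sq (n : ℕ) : pvConvMM n = pvSq n := by
  induction n using Nat.strong_induction_on with
  | _ n ih =>
    have hrec := pv_rec_conv n
    rw [Finset.sum_range_succ'] at hrec
    have hD20 : pvD2 0 = 1 := rfl
    rw [hD20, one_mul, Nat.sub_zero] at hrec
    have hsum : ∑ i ∈ Finset.range n, pvD2 (i + 1) * pvConvMM (n - (i + 1))
        = ((List.range (min n 18)).map (fun t => pvD2 (t + 1) * pvSq (n - (t + 1)))).sum := by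
      rw [pv_sum_list_finset]
      rw [← Finset.sum_subset (fun x hx => Finset.mem_range.mpr
        (lt_of_lt_of_le (Finset.mem_range.mp hx) (Nat.min_le_left n 18))) ?hz]
      · apply Finset.sum_congr rfl
        intro t ht
        have htm : t < min n 18 := Finset.mem_range.mp ht
        rw [ih (n - (t + 1)) (by omega)]
      · intro i hi hni
        have h1 : i < n := Finset.mem_range.mp hi
        have h2 : ¬ i < min n 18 := fun hc => hni (Finset.mem_range.mpr hc)
        rw [show pvD2 (i + 1) = 0 from List.getD_eq_default _ _ (by simp; omega), zero_mul]
    rw [pv_sq_rec n, ← hsum]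
    omega


lemma pv_pyGetD_map_range (f : ℕ → ℤ) (L : ℕ) (i : ℤ) (h0 : 0 ≤ i) (h1 : i < (L : ℤ)) :
    PySem.List.pyGetD ((List.range L).map f) i 0 = f i.toNat := by
  obtain ⟨m, rfl⟩ : ∃ m : ℕ, i = (m : ℤ) := ⟨i.toNat, by omega⟩
  rw [PySem.List.pyGetD_natCast, pv_getD_map_range, if_pos (by omega)]
  simp

lemma pv_passB (k : ℕ) (hk : 0 < k) (L : ℕ) (f : ℕ → ℤ) :
    (PySem.List.pyRange (k : ℤ) (L : ℤ) 1).foldl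
      (fun d m => PySem.List.pySetD d m (PySem.List.pyGetD d m 0 + PySem.List.pyGetD d (m - (k : ℤ)) 0))
      ((List.range L).map f)
    = (List.range L).map (pvPref (k - 1) f) := by
  rcases le_or_gt k L with hkL | hkL
  · apply pv_fill_loop L k hkL f (pvPref (k - 1) f)
    · intro c hkc hc
      have hget1 : PySem.List.pyGetD ((List.range L).map (fun m => if m < c then pvPref (k - 1) f m else f m)) (c : ℤ) 0 = f c := by
        rw [pv_pyGetD_map_range _ _ _ (by omega) (by exact_mod_cast hc)]
        simp
      have hget2 : PySem.List.pyGetD ((List.range L).map (fun m => if m < c then pvPref (k - 1) f m else f m)) ((c : ℤ) - (k : ℤ)) 0 = pvPref (k - 1) f (c - k) := by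
        rw [pv_pyGetD_map_range _ _ _ (by omega) (by exact_mod_cast by omega : ((c : ℤ) - k) < (L : ℤ))]
        rw [show ((c : ℤ) - (k : ℤ)).toNat = c - k from by omega]
        rw [if_pos (by omega)]
      rw [hget1, hget2, PySem.List.pySetD_natCast, pv_set_map_range _ hc]
      apply pv_map_range_congr
      intro m hm
      rcases eq_or_ne m c with rfl | hne
      · rw [Function.update_self, if_pos (by omega)]
        conv_rhs => rw [pvPref]
        rw [show (k - 1) + 1 = k from by omega, if_pos (by omega : k ≤ m)]
      · rw [Function.update_of_ne hne]
        rcases lt_or_ge m c with h | h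
        · rw [if_pos h, if_pos (by omega)]
        · rw [if_neg (by omega), if_neg (by omega)]
    · intro m hm
      rw [pvPref, if_neg (by omega), add_zero]
  · rw [PySem.List.pyRange_one_eq_nil (by exact_mod_cast by omega)]
    simp only [List.foldl_nil]
    apply pv_map_range_congr
    intro m hm
    rw [pvPref, if_neg (by omega), add_zero]

lemma pv_sum_map_neg (l : List ℕ) (g : ℕ → ℤ) :
    (l.map (fun t => -(g t))).sum = -((l.map g).sum) := by
  induction l with
  | nil => simp
  | cons a l ih => simp [ih]; ring


def pvOut : ℕ → ℤ := fun n => PySem.Int.floordiv (pvConvMM n + if 2 ∣ n then pvM (n / 2) else 0) 2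

lemma pv_A_char (n : ℕ) :
    parity_even_molien (n : Int) = (List.range (n + 1)).map pvOut := by
  have hrep : List.replicate ((n : ℤ) + 1).toNat (0 : ℤ) = (List.range (n + 1)).map (fun _ => 0) := by
    rw [List.map_const', List.length_range, show ((n : ℤ) + 1) = ((n + 1 : ℕ) : ℤ) from by push_cast; ring,
      Int.toNat_natCast]
  simp only [parity_even_molien]
  rw [show (2 * (n : ℤ)) = ((2 * n : ℕ) : ℤ) from by push_cast; ring, pv_molien_char (2 * n), hrep]
  simp only [List.length_map, List.length_range]
  rw [show ((n : ℤ) + 1) = ((n + 1 : ℕ) : ℤ) from by push_cast; ring]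
  have hfill := pv_fill_loop (n + 1) 0 (by omega) (fun _ => 0) pvOut
    (fun P nn => PySem.List.pySetD P nn (PySem.Int.floordiv (
        (PySem.List.pyRange 0 (nn + 1) 1).foldl (fun acc i =>
          if i < ((2 * n + 1 : ℕ) : ℤ) ∧ nn - i < ((2 * n + 1 : ℕ) : ℤ) then
            acc + PySem.List.pyGetD ((List.range (2 * n + 1)).map pvM) i 0 *
              PySem.List.pyGetD ((List.range (2 * n + 1)).map pvM) (nn - i) 0
          else acc) 0
        + (if PySem.Int.mod nn 2 = 0 ∧ PySem.Int.floordiv nn 2 < ((2 * n + 1 : ℕ) : ℤ) then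
            PySem.List.pyGetD ((List.range (2 * n + 1)).map pvM) (PySem.Int.floordiv nn 2) 0 else 0)) 2))
    (fun c _ hc => by
      dsimp only
      have hmsq : (PySem.List.pyRange 0 ((c : ℤ) + 1) 1).foldl (fun acc i =>
          if i < ((2 * n + 1 : ℕ) : ℤ) ∧ (c : ℤ) - i < ((2 * n + 1 : ℕ) : ℤ) then
            acc + PySem.List.pyGetD ((List.range (2 * n + 1)).map pvM) i 0 *
              PySem.List.pyGetD ((List.range (2 * n + 1)).map pvM) ((c : ℤ) - i) 0
          else acc) 0 = pvConvMM c := by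
        rw [show ((c : ℤ) + 1) = ((c + 1 : ℕ) : ℤ) from by push_cast; ring,
          PySem.List.pyRange_zero_natCast, List.foldl_map]
        rw [List.foldl_ext _ (fun acc (k : ℕ) => acc + pvM k * pvM (c - k)) 0 (fun acc k hk => by
          have hk' : k < c + 1 := List.mem_range.mp hk
          rw [if_pos ⟨by omega, by omega⟩, pv_pyGetD_map_range _ _ _ (by omega) (by omega),
            pv_pyGetD_map_range _ _ _ (by omega) (by omega),
            show ((k : ℤ)).toNat = k from by omega,
            show ((c : ℤ) - (k : ℤ)).toNat = c - k from by omega])]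
        rw [PySem.List.foldl_add (List.range (c + 1)) (fun k => pvM k * pvM (c - k)) 0, zero_add,
          pv_sum_list_finset]
        rfl
      have hfd : PySem.Int.floordiv (c : ℤ) 2 = ((c / 2 : ℕ) : ℤ) := by
        rw [show (2 : ℤ) = ((2 : ℕ) : ℤ) from rfl, PySem.Int.floordiv_natCast]
      have hmt2 : (if PySem.Int.mod (c : ℤ) 2 = 0 ∧ PySem.Int.floordiv (c : ℤ) 2 < ((2 * n + 1 : ℕ) : ℤ) then
            PySem.List.pyGetD ((List.range (2 * n + 1)).map pvM) (PySem.Int.floordiv (c : ℤ) 2) 0 else 0)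
          = (if 2 ∣ c then pvM (c / 2) else 0) := by
        rw [hfd, pv_pyGetD_map_range _ _ _ (by omega) (by omega),
          show (((c / 2 : ℕ) : ℤ)).toNat = c / 2 from by omega]
        have hiff : (PySem.Int.mod (c : ℤ) 2 = 0 ∧ ((c / 2 : ℕ) : ℤ) < ((2 * n + 1 : ℕ) : ℤ)) ↔ 2 ∣ c := by
          rw [PySem.Int.mod_eq_zero_iff_dvd]
          constructor
          · rintro ⟨h1, _⟩; omega
          · intro h; exact ⟨by omega, by omega⟩
        exact if_congr hiff rfl rfl
      rw [hmsq, hmt2, PySem.List.pySetD_natCast, pv_set_map_range _ hc]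
      apply pv_map_range_congr
      intro m hm
      rcases eq_or_ne m c with rfl | hne
      · rw [Function.update_self]
        conv_rhs => rw [if_pos (show m < m + 1 from by omega)]
        rfl
      · rw [Function.update_of_ne hne]
        rcases lt_or_ge m c with h | h
        · rw [if_pos h, if_pos (by omega)]
        · rw [if_neg (by omega), if_neg (by omega)])
    (fun m hm => absurd hm (by omega))
  rw [show ((0 : ℕ) : ℤ) = (0 : ℤ) from rfl] at hfill
  rw [hfill]

lemma pv_B_char (n : ℕ) :
    parity_even_molien_alt (n : Int) = (List.range (n + 1)).map
      (fun m => PySem.Int.floordiv (pvSq m + if 2 ∣ m then pvM (m / 2) else 0) 2) := by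
  have hrep : List.replicate ((n : ℤ) + 1).toNat (0 : ℤ) = (List.range (n + 1)).map (fun _ => 0) := by
    rw [List.map_const', List.length_range, show ((n : ℤ) + 1) = ((n + 1 : ℕ) : ℤ) from by push_cast; ring,
      Int.toNat_natCast]
  have hcons : (1 : ℤ) :: List.replicate (2 * (n : ℤ)).toNat 0 = (List.range (2 * n + 1)).map pvDelta := by
    rw [show (2 * (n : ℤ)).toNat = 2 * n from by omega]
    rw [List.range_succ_eq_map, List.map_cons, List.map_map]
    congr 1
    rw [show pvDelta ∘ Nat.succ = (fun _ => (0 : ℤ)) from funext fun x => by simp [pvDelta]]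
    rw [List.map_const', List.length_range]
  simp only [parity_even_molien_alt, List.foldl_cons, List.foldl_nil]
  rw [hcons]
  have hp2 := pv_passB 2 (by omega) (2 * n + 1) pvDelta
  have hp3 := pv_passB 3 (by omega) (2 * n + 1) (pvPref 1 pvDelta)
  have hp4 := pv_passB 4 (by omega) (2 * n + 1) (pvPref 2 (pvPref 1 pvDelta))
  push_cast at hp2 hp3 hp4
  rw [hp2, hp3, hp4,
    show (List.range (2 * n + 1)).map (pvPref 3 (pvPref 2 (pvPref 1 pvDelta))) = (List.range (2 * n + 1)).map pvDd from rfl]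
  have hM : (PySem.List.pyRange 0 (2 * (n : ℤ) + 1) 1).map (fun i =>
        PySem.List.pyGetD ((List.range (2 * n + 1)).map pvDd) i 0 +
          if 6 ≤ i then PySem.List.pyGetD ((List.range (2 * n + 1)).map pvDd) (i - 6) 0 else 0)
      = (List.range (2 * n + 1)).map pvM := by
    rw [show (2 * (n : ℤ) + 1) = ((2 * n + 1 : ℕ) : ℤ) from by push_cast; ring,
      PySem.List.pyRange_zero_natCast, List.map_map]
    apply List.map_congr_left
    intro k hk
    have hk' : k < 2 * n + 1 := List.mem_range.mp hk
    dsimp only [Function.comp]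
    rw [pv_pyGetD_map_range _ _ _ (by omega) (by omega), show ((k : ℤ)).toNat = k from by omega]
    by_cases h6 : 6 ≤ k
    · rw [if_pos (show (6 : ℤ) ≤ (k : ℤ) from by omega),
        show ((k : ℤ) - 6) = ((k - 6 : ℕ) : ℤ) from by omega,
        pv_pyGetD_map_range _ _ _ (by omega) (by omega),
        show (((k - 6 : ℕ) : ℤ)).toNat = k - 6 from by omega]
      simp only [pvM]
      rw [if_pos h6]
    · rw [if_neg (show ¬ (6 : ℤ) ≤ (k : ℤ) from by omega)]
      simp only [pvM]
      rw [if_neg h6]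
  rw [hM, hrep, show ((n : ℤ) + 1) = ((n + 1 : ℕ) : ℤ) from by push_cast; ring]
  have hfill := pv_fill_loop (n + 1) 0 (by omega) (fun _ => 0) pvSq
    (fun sq nn => PySem.List.pySetD sq nn
      ((PySem.List.pyRange 1 (min nn 18 + 1) 1).foldl (fun s k =>
          s - PySem.List.pyGetD ([1, 0, -2, -2, -1, 4, 5, 2, -3, -8, -3, 2, 5, 4, -1, -2, -2, 0, 1] : List Int) k 0 *
            PySem.List.pyGetD sq (nn - k) 0)
        ((if nn = 0 then 1 else 0) + (if nn = 6 then 2 else 0) + (if nn = 12 then 1 else 0))))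
    (fun c _ hc => by
      dsimp only
      have hs0 : ((if (c : ℤ) = 0 then (1 : ℤ) else 0) + (if (c : ℤ) = 6 then 2 else 0) +
          (if (c : ℤ) = 12 then 1 else 0)) = pvNum2 c := by
        rw [if_congr (show ((c : ℤ) = 0) ↔ c = 0 from by omega) rfl rfl,
          if_congr (show ((c : ℤ) = 6) ↔ c = 6 from by omega) rfl rfl,
          if_congr (show ((c : ℤ) = 12) ↔ c = 12 from by omega) rfl rfl]
        rfl
      rw [hs0]
      have hinner : (PySem.List.pyRange 1 (min (c : ℤ) 18 + 1) 1).foldl (fun s k =>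
            s - PySem.List.pyGetD ([1, 0, -2, -2, -1, 4, 5, 2, -3, -8, -3, 2, 5, 4, -1, -2, -2, 0, 1] : List Int) k 0 *
              PySem.List.pyGetD ((List.range (n + 1)).map (fun m => if m < c then pvSq m else 0)) ((c : ℤ) - k) 0)
          (pvNum2 c) = pvSq c := by
        rw [show (min (c : ℤ) 18 + 1) = ((min c 18 + 1 : ℕ) : ℤ) from by push_cast; ring,
          PySem.List.pyRange_one 1 ((min c 18 + 1 : ℕ) : ℤ),
          show ((((min c 18 + 1 : ℕ) : ℤ)) - 1).toNat = min c 18 from by omega,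
          List.foldl_map]
        rw [List.foldl_ext _ (fun s (t : ℕ) => s + (-(pvD2 (t + 1) * pvSq (c - (t + 1))))) _
          (fun s t ht => by
            have ht' : t < min c 18 := List.mem_range.mp ht
            rw [show ((1 : ℤ) + (t : ℤ)) = ((t + 1 : ℕ) : ℤ) from by push_cast; ring,
              PySem.List.pyGetD_natCast,
              pv_pyGetD_map_range _ _ _ (by omega) (by omega),
              show (((c : ℤ)) - ((t + 1 : ℕ) : ℤ)).toNat = c - (t + 1) from by omega,
              if_pos (by omega : c - (t + 1) < c),
              show (([1, 0, -2, -2, -1, 4, 5, 2, -3, -8, -3, 2, 5, 4, -1, -2, -2, 0, 1] : List Int).getD (t + 1) 0) = pvD2 (t + 1) from rfl]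
            ring)]
        rw [PySem.List.foldl_add (List.range (min c 18)) _ (pvNum2 c), pv_sum_map_neg,
          ← sub_eq_add_neg, ← pv_sq_rec c]
      rw [hinner, PySem.List.pySetD_natCast, pv_set_map_range _ hc]
      apply pv_map_range_congr
      intro m hm
      rcases eq_or_ne m c with rfl | hne
      · rw [Function.update_self]
        conv_rhs => rw [if_pos (show m < m + 1 from by omega)]
      · rw [Function.update_of_ne hne]
        rcases lt_or_ge m c with h | h
        · rw [if_pos h, if_pos (by omega)]
        · rw [if_neg (by omega), if_neg (by omega)])
    (fun m hm => absurd hm (by omega))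
  rw [show ((0 : ℕ) : ℤ) = (0 : ℤ) from rfl] at hfill
  rw [hfill]
  rw [PySem.List.pyRange_zero_natCast, List.map_map]
  apply List.map_congr_left
  intro m hm
  have hm' : m < n + 1 := List.mem_range.mp hm
  dsimp only [Function.comp]
  rw [pv_pyGetD_map_range _ _ _ (by omega) (by omega), show ((m : ℤ)).toNat = m from by omega]
  have hfd : PySem.Int.floordiv (m : ℤ) 2 = ((m / 2 : ℕ) : ℤ) := by
    rw [show (2 : ℤ) = ((2 : ℕ) : ℤ) from rfl, PySem.Int.floordiv_natCast]
  rw [hfd, pv_pyGetD_map_range _ _ _ (by omega) (by omega),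
    show (((m / 2 : ℕ) : ℤ)).toNat = m / 2 from by omega]
  congr 1
  congr 1
  apply if_congr _ rfl rfl
  rw [PySem.Int.mod_eq_zero_iff_dvd]
  omega

-- ===== VERDICT (by name: the statement is the Claim_ definition above) =====
theorem parity_even_molien_spec : Claim_equal_parity_even_molien := by
  intro n_max _ hpre
  unfold Spec_parity_even_molien
  obtain ⟨n, rfl⟩ := Int.eq_ofNat_of_zero_le hpre
  rw [pv_A_char, pv_B_char]
  exact pv_map_range_congr _ (fun m _ => by rw [pvOut, pv_conv_eq_sq])
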